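-- pv_equiv track=rewrite | github.com/Dsbaule/INE5452 | Lista 2 - Ad-Hoc e ordenação e Estrutura de Dados/02 - SortSortAndSort.py | sort_bucket
-- ===== SOURCE A (Python) =====
-- def sort_bucket(bucket):
--     odd = list()
--     even = list()
--
--     for number in bucket:
--         if mod(number, 2) == 0:
--             even.append(number)
--         else:
--             odd.append(number)
--
--     return sort_odds(odd) + sort_even(even)
--
-- def sort_even(numbers):
--     numbers.sort()
--     return numbers
--
-- def sort_odds(numbers):
--     numbers.sort(reverse=True)
--     return numbers
--
-- def mod(n, d):
--     if n < 0:
--         return -((-n) % d)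
--     else:
--         return n % d
-- ===== SOURCE B (Python) =====
-- def sort_bucket(bucket):
--     # one keyed sort: odds first (descending), then evens (ascending)
--     return sorted(bucket, key=lambda x: (x % 2 == 0, x if x % 2 == 0 else -x))
-- ===== Notes on version B (the rewrite author's own statement) =====
-- stated objective: idiomatic
-- what changed: Replaced the manual odd/even partition loop plus two separate sorts (one descending, one ascending) with a single sorted() call using a tuple key (parity, signed value).
import Mathlib
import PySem

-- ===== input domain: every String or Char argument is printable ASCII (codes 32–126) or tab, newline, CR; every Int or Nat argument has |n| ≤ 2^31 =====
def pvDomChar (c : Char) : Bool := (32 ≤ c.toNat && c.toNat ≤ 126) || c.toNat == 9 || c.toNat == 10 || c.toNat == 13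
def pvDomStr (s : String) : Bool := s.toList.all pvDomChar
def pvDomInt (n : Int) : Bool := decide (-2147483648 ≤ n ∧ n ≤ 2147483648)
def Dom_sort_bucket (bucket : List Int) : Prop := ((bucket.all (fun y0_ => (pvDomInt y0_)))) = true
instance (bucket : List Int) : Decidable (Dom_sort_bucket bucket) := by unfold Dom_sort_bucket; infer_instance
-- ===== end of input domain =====

-- B replaces A's partition loop plus two separate sorts with one keyed sort (tuple key (parity, ±x)); same cost, more idiomatic.


-- ===== PORT A =====
-- A's helper 'mod' (truncated mod: sign of the dividend; Python's '%' is PySem.Int.mod)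
def pymod (n d : Int) : Int := if n < 0 then -(PySem.Int.mod (-n) d) else PySem.Int.mod n d

-- A's helper 'sort_even' (numbers.sort(); the mutation is local to A's freshly built list)
def sort_even (numbers : List Int) : List Int := PySem.List.sorted numbers (fun x => x) false

-- A's helper 'sort_odds' (numbers.sort(reverse=True))
def sort_odds (numbers : List Int) : List Int := PySem.List.sorted numbers (fun x => x) true

def sort_bucket (bucket : List Int) : List Int :=
  let st := bucket.foldl
    (fun (st : List Int × List Int) number =>
      if pymod number 2 == 0 then (st.1, st.2 ++ [number]) else (st.1 ++ [number], st.2))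
    ([], [])
  sort_odds st.1 ++ sort_even st.2

-- ===== PORT B =====
-- B: sorted(bucket, key=lambda x: (x % 2 == 0, x if x % 2 == 0 else -x)); the bool key component False/True is ported as Int 0/1 (same order)
def sort_bucket_alt (bucket : List Int) : List Int :=
  PySem.List.sorted2 bucket
    (fun x => if PySem.Int.mod x 2 == 0 then (1 : Int) else 0)
    (fun x => if PySem.Int.mod x 2 == 0 then x else -x)
    false

-- ===== PRECONDITION & SPEC =====
def Spec_sort_bucket (bucket : List Int) (out : List Int) : Prop := out = sort_bucket_alt bucket
instance (bucket : List Int) (out : List Int) : Decidable (Spec_sort_bucket bucket out) := by unfold Spec_sort_bucket; infer_instance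

-- ===== CLAIM (what is proved, stated in full; the proofs are below) =====
def Claim_equal_sort_bucket : Prop := ∀ (bucket : List Int), Dom_sort_bucket bucket → Spec_sort_bucket bucket (sort_bucket bucket)

-- ===== LEMMAS AND PROOFS =====

-- B's combined sort key, viewed as one lexicographic pair
def bKey (x : Int) : Lex (Int × Int) :=
  toLex (if PySem.Int.mod x 2 == 0 then (1 : Int) else 0, if PySem.Int.mod x 2 == 0 then x else -x)

-- A's truncated mod and Python's floor mod agree on the parity test
theorem pymod_two_eq_zero_iff (n : Int) : (pymod n 2 == 0) = (PySem.Int.mod n 2 == 0) := by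
  unfold pymod
  by_cases h : n < 0 <;> simp [h, neg_eq_zero]

theorem bKey_injective : Function.Injective bKey := by
  intro a b hab
  unfold bKey at hab
  rw [toLex_inj, Prod.mk.injEq] at hab
  by_cases ha : (2:Int) ∣ a <;> by_cases hb : (2:Int) ∣ b <;>
    simp [ha, hb] at hab <;> omega

-- B's tuple-key sort IS the sort by the lexicographic key bKey (Python compares tuple keys lexicographically)
theorem sorted2_eq_sorted_bKey (xs : List Int) :
    sort_bucket_alt xs = PySem.List.sorted xs bKey false := by
  unfold sort_bucket_alt bKey
  simp only [PySem.List.sorted2, PySem.List.sorted, Bool.false_eq_true, if_false]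
  congr 1
  funext acc x
  congr 1
  funext a b
  simp only [Prod.Lex.toLex_lt_toLex]
  by_cases ha : (2:Int) ∣ a <;> by_cases hb : (2:Int) ∣ b <;>
    simp [ha, hb]

-- A's partition loop builds exactly (odds of l, evens of l), as filters
theorem partition_fold (l : List Int) (o e : List Int) :
    l.foldl
      (fun (st : List Int × List Int) number =>
        if pymod number 2 == 0 then (st.1, st.2 ++ [number]) else (st.1 ++ [number], st.2))
      (o, e)
    = (o ++ l.filter (fun x => !(PySem.Int.mod x 2 == 0)),
       e ++ l.filter (fun x => PySem.Int.mod x 2 == 0)) := by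
  induction l generalizing o e with
  | nil => simp
  | cons x t ih =>
    simp only [List.foldl_cons, List.filter_cons]
    by_cases h : PySem.Int.mod x 2 = 0
    · rw [if_pos (by rw [pymod_two_eq_zero_iff]; simpa using h)]
      rw [ih]
      have hd : (2:Int) ∣ x := (PySem.Int.mod_eq_zero_iff_dvd x 2).1 h
      simp [hd]
    · rw [if_neg (by rw [pymod_two_eq_zero_iff]; simpa using h)]
      rw [ih]
      have hd : ¬ (2:Int) ∣ x := fun hc => h ((PySem.Int.mod_eq_zero_iff_dvd x 2).2 hc)
      simp [hd]

theorem bKey_le_odd {a b : Int} (ha : ¬ (2:Int) ∣ a) (hb : ¬ (2:Int) ∣ b) (h : b ≤ a) :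
    bKey a ≤ bKey b := by
  unfold bKey
  rw [Prod.Lex.toLex_le_toLex]
  simp [ha, hb]; omega

theorem bKey_le_even {a b : Int} (ha : (2:Int) ∣ a) (hb : (2:Int) ∣ b) (h : a ≤ b) :
    bKey a ≤ bKey b := by
  unfold bKey
  rw [Prod.Lex.toLex_le_toLex]
  simp [ha, hb]; omega

theorem bKey_le_cross {a b : Int} (ha : ¬ (2:Int) ∣ a) (hb : (2:Int) ∣ b) :
    bKey a ≤ bKey b := by
  unfold bKey
  rw [Prod.Lex.toLex_le_toLex]
  simp [ha, hb]

-- ===== VERDICT (by name: the statement is the Claim_ definition above) =====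
theorem sort_bucket_spec : Claim_equal_sort_bucket := by
  intro bucket _
  unfold Spec_sort_bucket
  rw [sorted2_eq_sorted_bKey]
  unfold sort_bucket sort_odds sort_even
  rw [partition_fold]
  simp only [List.nil_append]
  set P : Int → Bool := fun x => PySem.Int.mod x 2 == 0 with hP
  have hPd : ∀ x : Int, P x = true ↔ (2:Int) ∣ x := by
    intro x; simp [hP]
  apply PySem.List.eq_of_perm_of_pairwise_le_of_injective bKey bKey_injective
  · -- both sides are permutations of bucket
    refine List.Perm.trans (List.Perm.append (PySem.List.sorted_perm _ _ _) (PySem.List.sorted_perm _ _ _)) ?_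
    refine List.Perm.trans ?_ (PySem.List.sorted_perm bucket bKey false).symm
    exact List.Perm.trans List.perm_append_comm (List.filter_append_perm P bucket)
  · -- A's result is bKey-ordered: odds descending, then evens ascending
    rw [List.pairwise_append]
    refine ⟨?_, ?_, ?_⟩
    · refine (PySem.List.sorted_pairwise_rev _ (fun x => x)).imp_of_mem ?_
      intro a b hamem hbmem hba
      rw [PySem.List.mem_sorted, List.mem_filter] at hamem hbmem
      exact bKey_le_odd (by simpa [hPd] using hamem.2) (by simpa [hPd] using hbmem.2) hba
    · refine (PySem.List.sorted_pairwise _ (fun x => x)).imp_of_mem ?_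
      intro a b hamem hbmem hab
      rw [PySem.List.mem_sorted, List.mem_filter] at hamem hbmem
      exact bKey_le_even ((hPd a).1 hamem.2) ((hPd b).1 hbmem.2) hab
    · intro a hamem b hbmem
      rw [PySem.List.mem_sorted, List.mem_filter] at hamem hbmem
      exact bKey_le_cross (by simpa [hPd] using hamem.2) ((hPd b).1 hbmem.2)
  · exact PySem.List.sorted_pairwise bucket bKey
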